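-- pv_equiv track=rewrite | github.com/AsheeHuang/NSP | NSP_GA/Local_search.py | fitness_OnDutyOver7
-- ===== SOURCE A (Python) =====
-- def fitness_OnDutyOver7(schedule):
--     sum_OnDutyOver7 = 0
--     OndutyCount = 0
--     for i in range(0, len(schedule)):
--         for j in range(0, len(schedule[0])):
--             if (j % 4 == 3):
--                 if (schedule[i][j] != 1):
--                     OndutyCount += 1
--                     if (OndutyCount >= 6):
--                         sum_OnDutyOver7 += 1
--                 else:
--                     OndutyCount = 0
--
--     return sum_OnDutyOver7
-- ===== SOURCE B (Python) =====
-- def fitness_OnDutyOver7(schedule):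
--     # Sliding-window counting: the result equals the number of length-6 windows of
--     # consecutive inspected cells (columns j%4==3, column bound from row 0) that are
--     # all on-duty (!= 1) -- each such window is exactly one ">= 6th consecutive" day.
--     cells = [schedule[i][j]
--              for i in range(len(schedule))
--              for j in range(len(schedule[0]))
--              if j % 4 == 3]
--     flags = [x != 1 for x in cells]
--     total = 0
--     for k in range(len(flags) - 5):
--         if all(flags[k:k + 6]):
--             total += 1
--     return total
-- ===== Notes on version B (the rewrite author's own statement) =====
-- stated objective: alternative
-- what changed: Replaces A's incremental reset-counter (OndutyCount with >=6 test) by sliding-window counting: flatten the inspected cells (j%4==3), turn them into on-duty flags, and count the length-6 windows that are all on-duty.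
import Mathlib
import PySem

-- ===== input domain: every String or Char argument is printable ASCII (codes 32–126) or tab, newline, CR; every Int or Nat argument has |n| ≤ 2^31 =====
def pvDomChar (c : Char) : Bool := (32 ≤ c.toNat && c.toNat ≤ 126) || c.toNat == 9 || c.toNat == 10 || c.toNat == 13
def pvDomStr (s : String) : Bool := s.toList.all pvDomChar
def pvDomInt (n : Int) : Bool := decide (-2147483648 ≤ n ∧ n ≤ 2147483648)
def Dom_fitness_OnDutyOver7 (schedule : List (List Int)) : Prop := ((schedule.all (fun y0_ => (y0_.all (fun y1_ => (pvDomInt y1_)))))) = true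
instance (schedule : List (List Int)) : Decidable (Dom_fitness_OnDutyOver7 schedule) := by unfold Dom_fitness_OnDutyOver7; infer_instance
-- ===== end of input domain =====

-- B replaces A's incremental reset-counter with sliding-window counting (same cost):
-- it counts the length-6 windows of consecutive inspected cells that are all != 1.

-- ===== PORT A =====
-- per-cell update of A's (sum_OnDutyOver7, OndutyCount) pair
def fit_stepA (st : Int × Int) (x : Int) : Int × Int :=
  if x ≠ 1 then (st.1 + (if st.2 + 1 ≥ 6 then 1 else 0), st.2 + 1) else (st.1, 0)

-- literal port of A's nested index loops (schedule[i][j] via pyGetD, in range inside Pre_)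
def fitness_OnDutyOver7 (schedule : List (List Int)) : Int :=
  ((PySem.List.pyRange 0 (schedule.length : Int) 1).foldl (fun (st : Int × Int) i =>
      (PySem.List.pyRange 0 ((PySem.List.pyGetD schedule 0 []).length : Int) 1).foldl (fun st j =>
        if PySem.Int.mod j 4 == 3 then
          fit_stepA st (PySem.List.pyGetD (PySem.List.pyGetD schedule i []) j 0)
        else st) st)
    ((0 : Int), (0 : Int))).1

-- ===== PORT B =====
-- port of B: the flattening comprehension, the flags list, then the window-counting loop
def fitness_OnDutyOver7_alt (schedule : List (List Int)) : Int :=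
  let cells := (PySem.List.pyRange 0 (schedule.length : Int) 1).flatMap (fun i =>
    ((PySem.List.pyRange 0 ((PySem.List.pyGetD schedule 0 []).length : Int) 1).filter
        (fun j => PySem.Int.mod j 4 == 3)).map
      (fun j => PySem.List.pyGetD (PySem.List.pyGetD schedule i []) j 0))
  let flags := cells.map (fun x => decide (x ≠ 1))
  (PySem.List.pyRange 0 ((flags.length : Int) - 5) 1).foldl
    (fun total k =>
      if (PySem.List.slice flags (some k) (some (k + 6))).all id then total + 1 else total)
    (0 : Int)

-- ===== PRECONDITION & SPEC =====
-- Pre_ excludes exactly the ragged schedules on which A raises IndexError: some row is too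
-- short for an inspected column index j % 4 == 3, j < len(schedule[0]).
def Pre_fitness_OnDutyOver7 (schedule : List (List Int)) : Prop :=
  ∀ row ∈ schedule, ∀ j < (schedule.headD []).length, j % 4 = 3 → j < row.length
instance (schedule : List (List Int)) : Decidable (Pre_fitness_OnDutyOver7 schedule) := by
  unfold Pre_fitness_OnDutyOver7; infer_instance

def pvWitness_fitness_OnDutyOver7 : List (List Int) := [[2, 0, 0, 0], [0, 0, 0, 1]]

def Spec_fitness_OnDutyOver7 (schedule : List (List Int)) (out : Int) : Prop := out = fitness_OnDutyOver7_alt schedule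
instance (schedule : List (List Int)) (out : Int) : Decidable (Spec_fitness_OnDutyOver7 schedule out) := by unfold Spec_fitness_OnDutyOver7; infer_instance

-- ===== CLAIM (what is proved, stated in full; the proofs are below) =====
def Claim_equal_fitness_OnDutyOver7 : Prop := ∀ (schedule : List (List Int)), Dom_fitness_OnDutyOver7 schedule → Pre_fitness_OnDutyOver7 schedule → Spec_fitness_OnDutyOver7 schedule (fitness_OnDutyOver7 schedule)

-- ===== LEMMAS AND PROOFS =====

-- number of length-6 all-true windows of a flag list (reference quantity both programs compute)
def fit_numW : List Bool → Nat
  | [] => 0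
  | b :: rest =>
      (if 6 ≤ (b :: rest).length ∧ ((b :: rest).take 6).all id = true then 1 else 0) + fit_numW rest

theorem fit_numW_short (l : List Bool) (h : l.length < 6) : fit_numW l = 0 := by
  induction l with
  | nil => rfl
  | cons b rest ih =>
    rw [fit_numW, if_neg (by simp at h ⊢; omega), ih (by simp at h ⊢; omega)]

-- a true prepended to a true-block commutes with the block
theorem fit_cons_replicate (n : Nat) (L : List Bool) :
    List.replicate n true ++ true :: L = true :: (List.replicate n true ++ L) := by
  rw [← List.cons_append, ← List.replicate_succ, List.replicate_succ', List.append_assoc,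
    List.singleton_append]

-- a false within the first 6 positions kills the head window
theorem fit_all_take_false (c : Nat) (rest : List Bool) (hc : c ≤ 5) :
    ((List.replicate c true ++ false :: rest).take 6).all id = false := by
  interval_cases c <;> simp [List.replicate]

-- an off-duty day after at most 5 carried on-duty days contributes no window
theorem fit_numW_false (c : Nat) (rest : List Bool) (hc : c ≤ 5) :
    fit_numW (List.replicate c true ++ false :: rest) = fit_numW rest := by
  induction c generalizing rest with
  | zero => simp [fit_numW]
  | succ c ih =>
    have hall := fit_all_take_false (c + 1) rest hc
    rw [List.replicate_succ, List.cons_append] at hall ⊢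
    rw [fit_numW, if_neg (by rw [hall]; simp), Nat.zero_add]
    exact ih rest (by omega)

-- a 6th consecutive on-duty day contributes exactly one window
theorem fit_numW_true_run (L : List Bool) :
    fit_numW (true :: (List.replicate 5 true ++ L)) = 1 + fit_numW (List.replicate 5 true ++ L) := by
  rw [fit_numW, if_pos ⟨by simp, by simp [List.replicate]⟩]

-- A's counter fold equals the window count, with c carried-in on-duty days (only min c 5 matter)
theorem fit_A_char (cells : List Int) : ∀ (s : Int) (c : Nat),
    (cells.foldl fit_stepA (s, (c : Int))).1
      = s + (fit_numW (List.replicate (min c 5) true ++ cells.map (fun x => decide (x ≠ 1))) : Int) := by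
  induction cells with
  | nil =>
    intro s c
    rw [List.foldl_nil, List.map_nil, List.append_nil,
      fit_numW_short _ (by simp)]
    simp
  | cons x cells ih =>
    intro s c
    by_cases hx : x = 1
    · subst hx
      have ha : fit_stepA (s, (c : Int)) 1 = (s, ((0 : Nat) : Int)) := by simp [fit_stepA]
      rw [List.foldl_cons, ha, ih s 0, List.map_cons,
        show decide ((1 : Int) ≠ 1) = false by decide]
      rw [fit_numW_false (min c 5) _ (by omega)]
      simp
    · have ha : fit_stepA (s, (c : Int)) x
          = (s + (if 5 ≤ c then 1 else 0), ((c + 1 : Nat) : Int)) := by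
        have hcond : (if (c : Int) + 1 ≥ 6 then (1 : Int) else 0) = (if 5 ≤ c then 1 else 0) := by
          by_cases h5 : 5 ≤ c
          · rw [if_pos (by omega : (c : Int) + 1 ≥ 6), if_pos h5]
          · rw [if_neg (by omega), if_neg h5]
        have h2 : ((c : Int) + 1) = ((c + 1 : Nat) : Int) := by push_cast; ring
        simp only [fit_stepA, if_pos hx]
        rw [hcond, h2]
      rw [List.foldl_cons, ha, ih _ (c + 1), List.map_cons,
        show decide (x ≠ 1) = true by simp [hx]]
      by_cases h5 : 5 ≤ c
      · rw [if_pos h5, min_eq_right (by omega : 5 ≤ c), min_eq_right (by omega : 5 ≤ c + 1),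
          fit_cons_replicate 5, fit_numW_true_run]
        push_cast; ring
      · rw [if_neg h5, min_eq_left (by omega : c ≤ 5), min_eq_left (by omega : c + 1 ≤ 5)]
        have hsplit : List.replicate c true ++ true :: cells.map (fun x => decide (x ≠ 1))
            = List.replicate (c + 1) true ++ cells.map (fun x => decide (x ≠ 1)) := by
          rw [List.replicate_succ', List.append_assoc, List.singleton_append]
        rw [hsplit]
        ring

-- index-free form of B's window count
theorem fit_count_char (flags : List Bool) :
    (List.range (flags.length - 5)).countP (fun j => ((flags.drop j).take 6).all id)
      = fit_numW flags := by
  induction flags with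
  | nil => rfl
  | cons b rest ih =>
    by_cases h : 5 ≤ rest.length
    · rw [show (b :: rest).length - 5 = (rest.length - 5) + 1 by simp; omega,
        List.range_succ_eq_map, List.countP_cons, List.countP_map]
      have hcomp : ((fun j => (((b :: rest).drop j).take 6).all id) ∘ Nat.succ)
          = (fun j => ((rest.drop j).take 6).all id) := rfl
      rw [hcomp, ih, fit_numW]
      have h6 : 6 ≤ (b :: rest).length := by simp; omega
      rw [List.drop_zero]
      by_cases hb : ((b :: rest).take 6).all id = true
      · rw [hb, if_pos rfl, if_pos ⟨h6, rfl⟩]; omega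
      · rw [Bool.not_eq_true] at hb
        rw [hb]; simp
    · rw [show (b :: rest).length - 5 = 0 by simp; omega, List.range_zero, List.countP_nil,
        fit_numW_short _ (by simp; omega)]

-- B's range-and-slice fold is the window count
theorem fit_B_char (flags : List Bool) :
    (PySem.List.pyRange 0 ((flags.length : Int) - 5) 1).foldl
        (fun total k =>
          if (PySem.List.slice flags (some k) (some (k + 6))).all id then total + 1 else total)
        (0 : Int)
      = (fit_numW flags : Int) := by
  rw [PySem.List.foldl_if_add_one, PySem.List.pyRange_one, List.countP_map]
  have htoNat : ((flags.length : Int) - 5 - 0).toNat = flags.length - 5 := by omega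
  rw [htoNat]
  have hp : ∀ j : Nat,
      ((fun k : Int => (PySem.List.slice flags (some k) (some (k + 6))).all id) ∘
          (fun k : Nat => (0 : Int) + ↑k)) j
        = ((flags.drop j).take 6).all id := by
    intro j
    have h1 : ((0 : Int) + ↑j) = ((j : Nat) : Int) := by omega
    have h2 : ((j : Nat) : Int) + 6 = (((j + 6 : Nat)) : Int) := by omega
    rw [Function.comp_apply, h1, h2, PySem.List.slice_natCast,
      show j + 6 - j = 6 by omega]
  rw [funext hp, fit_count_char]
  omega

-- A's guarded inner loop over all columns is fit_stepA folded over the row's inspected cells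
theorem fit_rowfold (row : List Int) (w : Int) (st : Int × Int) :
    (PySem.List.pyRange 0 w 1).foldl (fun st j =>
        if PySem.Int.mod j 4 == 3 then fit_stepA st (PySem.List.pyGetD row j 0) else st) st
      = (((PySem.List.pyRange 0 w 1).filter (fun j => PySem.Int.mod j 4 == 3)).map
          (fun j => PySem.List.pyGetD row j 0)).foldl fit_stepA st := by
  rw [List.foldl_map, List.foldl_filter]

-- the index-based flatMap of B's comprehension is a flatMap over the rows themselves
theorem fit_flatMap_rows (xs : List (List Int)) (g : List Int → List Int) :
    (PySem.List.pyRange 0 (xs.length : Int) 1).flatMap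
        (fun i => g (PySem.List.pyGetD xs i [])) = xs.flatMap g := by
  conv_rhs => rw [← PySem.List.map_pyGetD_pyRange_zero' xs []]
  rw [List.flatMap_map]

-- ===== VERDICT (by name: the statement is the Claim_ definition above) =====
theorem fitness_OnDutyOver7_spec : Claim_equal_fitness_OnDutyOver7 := by
  intro schedule _ _
  unfold Spec_fitness_OnDutyOver7 fitness_OnDutyOver7 fitness_OnDutyOver7_alt
  simp only [fit_rowfold]
  rw [PySem.List.foldl_pyRange_zero_pyGetD' schedule []
      (fun st row => (((PySem.List.pyRange 0 ((PySem.List.pyGetD schedule 0 []).length : Int) 1).filter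
          (fun j => PySem.Int.mod j 4 == 3)).map (fun j => PySem.List.pyGetD row j 0)).foldl fit_stepA st)
      ((0 : Int), (0 : Int))]
  rw [fit_flatMap_rows schedule
      (fun row => ((PySem.List.pyRange 0 ((PySem.List.pyGetD schedule 0 []).length : Int) 1).filter
          (fun j => PySem.Int.mod j 4 == 3)).map (fun j => PySem.List.pyGetD row j 0))]
  rw [← List.foldl_flatMap]
  rw [show ((0 : Int), (0 : Int)) = ((0 : Int), ((0 : Nat) : Int)) by norm_num,
    fit_A_char _ 0 0, fit_B_char]
  simp
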